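-- pv_equiv track=rewrite | github.com/ComparativeGenomicsToolkit/cactus | src/cactus/progressive/cactus_terra_helper.py | remove_jobs
-- ===== SOURCE A (Python) =====
-- def remove_jobs(job_names, wdl_lines):
--     """ if a job's in our cache, we remove its call from the wdl """
--     out_lines = []
--
--     hide_line = False
--     for i, wdl_line in enumerate(wdl_lines):
--         wdl_line = wdl_line.strip()
--         if wdl_line.startswith('call '):
--             assert not hide_line
--             job_name = wdl_line.split()[3]
--             if job_name in job_names:
--                 hide_line = True
--         if not hide_line:
--             out_lines.append(wdl_lines[i])
--
--         if hide_line and wdl_line.startswith('}'):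
--             hide_line = False
--
--     return out_lines
-- ===== SOURCE B (Python) =====
-- def remove_jobs(job_names, wdl_lines):
--     """ if a job's in our cache, we remove its call from the wdl """
--     jobs = set(job_names)
--     out_lines = []
--     i = 0
--     n = len(wdl_lines)
--     while i < n:
--         line = wdl_lines[i]
--         stripped = line.strip()
--         i += 1
--         if stripped.startswith('call ') and stripped.split()[3] in jobs:
--             # skip the whole call block, up to and including its closing '}'
--             while i < n and not wdl_lines[i].strip().startswith('}'):
--                 i += 1
--             i += 1
--         else:
--             out_lines.append(line)
--     return out_lines
-- ===== Notes on version B (the rewrite author's own statement) =====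
-- stated objective: alternative
-- what changed: Replaces A's boolean hide_line flag threaded through a single enumerate loop by a two-level structure: an outer loop over lines and, on a matched 'call' line, an inner skip loop that consumes the whole block up to and including its closing '}'.
import Mathlib
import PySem

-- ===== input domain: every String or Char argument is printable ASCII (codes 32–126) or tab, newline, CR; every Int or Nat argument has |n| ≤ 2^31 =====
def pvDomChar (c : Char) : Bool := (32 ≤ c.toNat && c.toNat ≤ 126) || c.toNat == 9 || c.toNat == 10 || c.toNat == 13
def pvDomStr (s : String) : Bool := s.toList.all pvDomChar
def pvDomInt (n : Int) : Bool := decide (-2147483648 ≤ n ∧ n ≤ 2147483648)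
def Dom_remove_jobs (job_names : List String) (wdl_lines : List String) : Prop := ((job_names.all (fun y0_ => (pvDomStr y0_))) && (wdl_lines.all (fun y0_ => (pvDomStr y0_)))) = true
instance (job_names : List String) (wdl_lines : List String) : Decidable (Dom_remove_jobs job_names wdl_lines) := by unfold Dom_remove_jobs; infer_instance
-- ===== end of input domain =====

-- B replaces A's hide_line flag state machine by an outer loop over lines with an
-- inner loop that skips a suppressed call block through its closing '}' (alternative
-- decomposition, same cost).

-- ===== PORT A =====
-- step of A's for-loop; state = (out_lines, hide_line).  wdl_lines[i] = the current
-- element, so the fold carries the unstripped line.  A's `assert not hide_line` and the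
-- possible IndexError of split()[3] are the raising paths excluded by Pre_ below; on
-- excluded inputs the port reads the 4th token with default "".
def stepA (job_names : List String) (st : List String × Bool) (wdl_line : String) : List String × Bool :=
  let s := PySem.Str.strip wdl_line
  let hide1 : Bool :=
    if PySem.Str.startswith s "call " then
      (if job_names.contains ((PySem.Str.split₀ s).getD 3 "") then true else st.2)
    else st.2
  let out := if hide1 = false then st.1 ++ [wdl_line] else st.1
  let hide2 : Bool := if hide1 && PySem.Str.startswith s "}" then false else hide1
  (out, hide2)

def remove_jobs (job_names : List String) (wdl_lines : List String) : List String :=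
  (wdl_lines.foldl (stepA job_names) ([], false)).1

-- ===== PORT B =====
-- inner while loop of B: drop lines up to and including the first whose strip starts with '}'
def skipBlock : List String → List String
  | [] => []
  | l :: rest => if PySem.Str.startswith (PySem.Str.strip l) "}" then rest else skipBlock rest

theorem skipBlock_length_le : ∀ (xs : List String), (skipBlock xs).length ≤ xs.length := by
  intro xs
  induction xs with
  | nil => simp [skipBlock]
  | cons l rest ih =>
    simp only [skipBlock]
    split
    · simp
    · exact Nat.le_trans ih (Nat.le_succ _)

-- outer while loop of B
def goB (job_names : List String) : List String → List String
  | [] => []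
  | l :: rest =>
    let s := PySem.Str.strip l
    if PySem.Str.startswith s "call " && job_names.contains ((PySem.Str.split₀ s).getD 3 "") then
      goB job_names (skipBlock rest)
    else
      l :: goB job_names rest
  termination_by lines => lines.length
  decreasing_by
  · exact Nat.lt_succ_of_le (skipBlock_length_le rest)
  · simp

def remove_jobs_alt (job_names : List String) (wdl_lines : List String) : List String :=
  goB job_names wdl_lines

-- ===== PRECONDITION & SPEC =====
-- predicates used only by Pre_ (closed-form reading of one line)
def pvIsCall (l : String) : Bool := PySem.Str.startswith (PySem.Str.strip l) "call "
def pvIsRB (l : String) : Bool := PySem.Str.startswith (PySem.Str.strip l) "}"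
def pvMatched (job_names : List String) (l : String) : Bool :=
  pvIsCall l && job_names.contains ((PySem.Str.split₀ (PySem.Str.strip l)).getD 3 "")

-- Pre_ excludes exactly the inputs on which A raises: an IndexError from split()[3] on a
-- 'call ' line with fewer than 4 whitespace-separated tokens, or an AssertionError when a
-- 'call ' line occurs after a suppressed call line with no '}' line strictly between them.
def Pre_remove_jobs (job_names : List String) (wdl_lines : List String) : Prop :=
  (∀ l ∈ wdl_lines, pvIsCall l = true → 4 ≤ (PySem.Str.split₀ (PySem.Str.strip l)).length) ∧
  (∀ i ∈ List.range wdl_lines.length, ∀ j ∈ List.range wdl_lines.length, i < j →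
      pvMatched job_names (wdl_lines.getD i "") = true →
      pvIsCall (wdl_lines.getD j "") = true →
      ∃ k ∈ List.range wdl_lines.length, i < k ∧ k < j ∧ pvIsRB (wdl_lines.getD k "") = true)

instance (job_names : List String) (wdl_lines : List String) : Decidable (Pre_remove_jobs job_names wdl_lines) := by
  unfold Pre_remove_jobs; infer_instance

def pvWitness_remove_jobs : List String × List String :=
  (["jobX"], ["workflow w {", "  call t as c1 jobY {", "  }", "  call t as c2 jobX {", "  }", "}"])

def Spec_remove_jobs (job_names : List String) (wdl_lines : List String) (out : List String) : Prop := out = remove_jobs_alt job_names wdl_lines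
instance (job_names : List String) (wdl_lines : List String) (out : List String) : Decidable (Spec_remove_jobs job_names wdl_lines out) := by unfold Spec_remove_jobs; infer_instance

-- ===== CLAIM (what is proved, stated in full; the proofs are below) =====
def Claim_equal_remove_jobs : Prop := ∀ (job_names : List String) (wdl_lines : List String), Dom_remove_jobs job_names wdl_lines → Pre_remove_jobs job_names wdl_lines → Spec_remove_jobs job_names wdl_lines (remove_jobs job_names wdl_lines)

-- ===== LEMMAS AND PROOFS =====

-- a line whose strip starts with "call " cannot also start with "}"
theorem call_not_rb (s : String) (h : PySem.Str.startswith s "call " = true) :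
    PySem.Str.startswith s "}" = false := by
  simp only [PySem.Str.startswith_eq] at *
  rw [show ("call ").toList = ['c','a','l','l',' '] from rfl] at h
  rw [show ("}").toList = ['}'] from rfl]
  cases hs : s.toList with
  | nil => rw [hs] at h; simp [PySem.Chars.startswith, List.isPrefixOf] at h
  | cons c cs =>
    rw [hs] at h
    simp only [PySem.Chars.startswith, List.isPrefixOf, Bool.and_eq_true, beq_iff_eq] at h ⊢
    rcases h with ⟨rfl, -⟩
    simp

-- the fold of A, from either flag state, computes B's result
theorem foldA_goB (jn : List String) : ∀ (lines : List String) (out : List String),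
    ((lines.foldl (stepA jn) (out, false)).1 = out ++ goB jn lines) ∧
    ((lines.foldl (stepA jn) (out, true)).1 = out ++ goB jn (skipBlock lines)) := by
  intro lines
  induction lines with
  | nil => intro out; simp [goB, skipBlock]
  | cons l rest ih =>
    intro out
    constructor
    · simp only [List.foldl_cons]
      by_cases hc : PySem.Str.startswith (PySem.Str.strip l) "call " = true
      · by_cases hj : jn.contains ((PySem.Str.split₀ (PySem.Str.strip l)).getD 3 "") = true
        · have hrb := call_not_rb _ hc
          have hstep : stepA jn (out, false) l = (out, true) := by
            simp only [stepA, hc, hj, hrb, if_true, Bool.true_and, Bool.false_eq_true, ite_false,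
              Bool.true_eq_false]
          rw [hstep, goB, if_pos (by rw [hc, hj]; rfl)]
          exact (ih out).2
        · rw [Bool.not_eq_true] at hj
          have hstep : stepA jn (out, false) l = (out ++ [l], false) := by
            simp only [stepA, hc, hj, if_true, ite_false, Bool.false_and, Bool.false_eq_true]
          rw [hstep, goB, if_neg (by rw [hj]; simp)]
          rw [(ih (out ++ [l])).1, List.append_assoc]
          rfl
      · rw [Bool.not_eq_true] at hc
        have hstep : stepA jn (out, false) l = (out ++ [l], false) := by
          simp only [stepA, hc, Bool.false_eq_true, ite_false, ite_true, Bool.false_and]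
        rw [hstep, goB, if_neg (by rw [hc]; simp)]
        rw [(ih (out ++ [l])).1, List.append_assoc]
        rfl
    · simp only [List.foldl_cons]
      by_cases hr : PySem.Str.startswith (PySem.Str.strip l) "}" = true
      · have hc : PySem.Str.startswith (PySem.Str.strip l) "call " = false := by
          by_cases h : PySem.Str.startswith (PySem.Str.strip l) "call " = true
          · rw [call_not_rb _ h] at hr; exact absurd hr (by simp)
          · exact Bool.not_eq_true _ |>.mp h
        have hstep : stepA jn (out, true) l = (out, false) := by
          simp only [stepA, hc, hr, Bool.false_eq_true, ite_false, Bool.true_and, ite_true,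
            Bool.true_eq_false]
        rw [hstep, skipBlock, if_pos hr]
        exact (ih out).1
      · rw [Bool.not_eq_true] at hr
        have hstep : stepA jn (out, true) l = (out, true) := by
          simp only [stepA, hr]
          split <;> simp
        rw [hstep, skipBlock, if_neg (by rw [hr]; simp)]
        exact (ih out).2

-- ===== VERDICT (by name: the statement is the Claim_ definition above) =====
theorem remove_jobs_spec : Claim_equal_remove_jobs := by
  intro job_names wdl_lines _ _
  unfold Spec_remove_jobs remove_jobs remove_jobs_alt
  simpa using (foldA_goB job_names wdl_lines []).1
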